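-- pv_equiv track=rewrite | github.com/ariellubonja/coding-interview-prep | Dynamic Programming/Solitaire.py | solve_6_subseq
-- ===== SOURCE A (Python) =====
-- from copy import deepcopy
--
-- def solve_6_subseq(seq):
--     # Find minimum sum in this sequence
--     argmaxes = []
--     currSum = 0
--     MIN_INT = -9223372036854775807 # Python3 doesn't have a min int but close enough
--     prevSum = MIN_INT
--
--     newseq = seq.copy()
--     while len(newseq) > 0:
--         # Find max elements of the current sequence, in order from biggest to least
--         ss_max = max(newseq)
--
--         currSum += ss_max
--
--         if prevSum >= currSum:
--             break
--
--         argmaxes.append(seq.index(ss_max))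
--         newseq.remove(ss_max)
--         prevSum = deepcopy(currSum) # update prevSum to match
--
--
--     return min(argmaxes), prevSum # Max Sum and starting location
-- ===== SOURCE B (Python) =====
-- def solve_6_subseq(seq):
--     # Single pass: sum all strictly positive elements and remember the index
--     # of the first positive one; if there is no positive element, fall back
--     # to the maximum element and the first index where it occurs.
--     total = 0
--     first_idx = None
--     for i, x in enumerate(seq):
--         if x > 0:
--             total += x
--             if first_idx is None:
--                 first_idx = i
--     if first_idx is None:
--         m = max(seq)
--         return seq.index(m), m
--     return first_idx, total
-- ===== Notes on version B (the rewrite author's own statement) =====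
-- stated objective: faster
-- what changed: Replaced the repeated max/index/remove selection loop (each pass scans the whole remaining list) by one enumerate pass that sums the positive elements and records the index of the first positive one, with a max/index fallback only when no element is positive.
import Mathlib
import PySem

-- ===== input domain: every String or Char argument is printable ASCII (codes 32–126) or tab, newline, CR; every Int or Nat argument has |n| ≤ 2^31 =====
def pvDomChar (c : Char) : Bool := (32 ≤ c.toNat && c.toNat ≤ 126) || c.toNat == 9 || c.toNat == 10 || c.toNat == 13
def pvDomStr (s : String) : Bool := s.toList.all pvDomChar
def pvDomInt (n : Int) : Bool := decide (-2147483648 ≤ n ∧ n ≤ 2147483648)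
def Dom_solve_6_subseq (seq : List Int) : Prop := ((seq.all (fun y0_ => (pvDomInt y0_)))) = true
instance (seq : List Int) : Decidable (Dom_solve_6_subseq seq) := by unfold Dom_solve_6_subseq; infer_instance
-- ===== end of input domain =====

-- B replaces A's repeated max/index/remove scans by a single pass over the list (asymptotically faster).

-- ===== PORT A =====
-- seq.index(v) as an Int; at every call site v is an element of seq, so index? is some
def pvIdxA (seq : List Int) (v : Int) : Int :=
  ((PySem.List.index? seq v).map Int.ofNat).getD 0

-- the while-loop of A: newseq shrinks by removing the current max each round
def solve6LoopA (seq newseq argmaxes : List Int) (currSum prevSum : Int) : Int × Int :=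
  match h : PySem.List.max? newseq (fun y => y) with
  | none => ((PySem.List.min? argmaxes (fun y => y)).getD 0, prevSum)
  | some ss_max =>
    if prevSum ≥ currSum + ss_max then
      ((PySem.List.min? argmaxes (fun y => y)).getD 0, prevSum)
    else
      solve6LoopA seq ((PySem.List.remove? newseq ss_max).getD [])
        (argmaxes ++ [pvIdxA seq ss_max]) (currSum + ss_max) (currSum + ss_max)
termination_by newseq.length
decreasing_by
  have hm := PySem.List.max?_mem h
  rw [PySem.List.remove?_eq_some_erase newseq ss_max hm]
  have h1 := List.length_erase_of_mem hm
  have h2 : 0 < newseq.length := List.length_pos_of_mem hm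
  simp only [Option.getD_some]
  omega

def solve_6_subseq (seq : List Int) : Int × Int :=
  solve6LoopA seq seq [] 0 (-9223372036854775807)

-- ===== PORT B =====
-- the enumerate loop of B: running sum of positives and first positive index
def solve6LoopB : List Int → Int → Int → Option Int → Int × Option Int
  | [], _, s, idx => (s, idx)
  | x :: xs, i, s, idx =>
    if 0 < x then
      solve6LoopB xs (i + 1) (s + x) (if idx.isNone then some i else idx)
    else
      solve6LoopB xs (i + 1) s idx

def solve_6_subseq_alt (seq : List Int) : Int × Int :=
  match solve6LoopB seq 0 0 none with
  | (total, some i) => (i, total)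
  | (_, none) =>
    match PySem.List.max? seq (fun y => y) with
    | some m => (((PySem.List.index? seq m).map Int.ofNat).getD 0, m)
    | none => (0, 0)  -- unreachable under Pre_ (seq ≠ [])

-- ===== PRECONDITION & SPEC =====
-- Pre_ excludes only the empty list, on which A raises ValueError (min of an empty sequence).
def Pre_solve_6_subseq (seq : List Int) : Prop := seq ≠ []
instance (seq : List Int) : Decidable (Pre_solve_6_subseq seq) := by unfold Pre_solve_6_subseq; infer_instance

def pvWitness_solve_6_subseq : List Int := [1, -2, 3]

def Spec_solve_6_subseq (seq : List Int) (out : Int × Int) : Prop := out = solve_6_subseq_alt seq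
instance (seq : List Int) (out : Int × Int) : Decidable (Spec_solve_6_subseq seq out) := by unfold Spec_solve_6_subseq; infer_instance

-- ===== CLAIM (what is proved, stated in full; the proofs are below) =====
def Claim_equal_solve_6_subseq : Prop := ∀ (seq : List Int), Dom_solve_6_subseq seq → Pre_solve_6_subseq seq → Spec_solve_6_subseq seq (solve_6_subseq seq)

-- ===== LEMMAS AND PROOFS =====

-- sum of the strictly positive elements
def sumPos (l : List Int) : Int := (l.filter (fun x => decide (0 < x))).sum

-- min? (id key) only depends on the set of elements
lemma min?_getD_congr (l l' : List Int) (h : ∀ x : Int, x ∈ l ↔ x ∈ l') :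
    (PySem.List.min? l (fun y => y)).getD 0 = (PySem.List.min? l' (fun y => y)).getD 0 := by
  cases hl : PySem.List.min? l (fun y => y) with
  | none =>
    cases hl' : PySem.List.min? l' (fun y => y) with
    | none => rfl
    | some m' =>
      exfalso
      have hm' : m' ∈ l' := PySem.List.min?_mem hl'
      have : m' ∈ l := (h m').mpr hm'
      rw [(PySem.List.min?_eq_none_iff l _).mp hl] at this
      simp at this
  | some m =>
    cases hl' : PySem.List.min? l' (fun y => y) with
    | none =>
      exfalso
      have hm : m ∈ l := PySem.List.min?_mem hl
      have : m ∈ l' := (h m).mp hm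
      rw [(PySem.List.min?_eq_none_iff l' _).mp hl'] at this
      simp at this
    | some m' =>
      simp only [Option.getD_some]
      have hm : m ∈ l := PySem.List.min?_mem hl
      have hm' : m' ∈ l' := PySem.List.min?_mem hl'
      have h1 := PySem.List.min?_isMin hl m' ((h m').mpr hm')
      have h2 := PySem.List.min?_isMin hl' m ((h m).mp hm)
      omega

-- positives of newseq = max :: positives of (newseq.erase max), as sum and as set
lemma sumPos_erase_max {newseq : List Int} {m : Int} (hm : m ∈ newseq) (hpos : 0 < m) :
    sumPos newseq = m + sumPos (newseq.erase m) := by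
  have hperm : List.Perm newseq (m :: newseq.erase m) := List.perm_cons_erase hm
  have := (hperm.filter (fun x => decide (0 < x))).sum_eq
  unfold sumPos
  rw [this]
  simp [hpos]

lemma loopA_eq (seq : List Int) : ∀ (n : Nat) (newseq acc : List Int) (c : Int),
    newseq.length = n → (∀ x ∈ newseq, x ∈ seq) →
    solve6LoopA seq newseq acc c c =
      ((PySem.List.min? (acc ++ (newseq.filter (fun x => decide (0 < x))).map (pvIdxA seq)) (fun y => y)).getD 0,
       c + sumPos newseq) := by
  intro n
  induction n using Nat.strong_induction_on with
  | _ n ih =>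
    intro newseq acc c hlen hsub
    rw [solve6LoopA.eq_def]
    cases hmax : PySem.List.max? newseq (fun y => y) with
    | none =>
      have hnil : newseq = [] := (PySem.List.max?_eq_none_iff newseq _).mp hmax
      subst hnil
      simp [sumPos]
    | some m =>
      have hm : m ∈ newseq := PySem.List.max?_mem hmax
      have hmaxle : ∀ y ∈ newseq, y ≤ m := by
        intro y hy; exact PySem.List.max?_isMax hmax y hy
      by_cases hmle : m ≤ 0
      · -- loop breaks: no positives remain
        have hcond : c ≥ c + m := by omega
        simp only [hcond, if_pos]
        have hfil : newseq.filter (fun x => decide (0 < x)) = [] := by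
          rw [List.filter_eq_nil_iff]
          intro x hx
          have := hmaxle x hx
          simp; omega
        simp [hfil, sumPos]
      · have hpos : 0 < m := by omega
        have hcond : ¬ (c ≥ c + m) := by omega
        simp only [hcond, if_neg, not_false_iff]
        rw [PySem.List.remove?_eq_some_erase newseq m hm]
        simp only [Option.getD_some]
        have hlt : (newseq.erase m).length < n := by
          have h1 := List.length_erase_of_mem hm
          have h2 : 0 < newseq.length := List.length_pos_of_mem hm
          omega
        rw [ih (newseq.erase m).length hlt (newseq.erase m) (acc ++ [pvIdxA seq m]) (c + m) rfl
            (fun x hx => hsub x (List.erase_subset hx))]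
        simp only [Prod.mk.injEq]
        constructor
        · -- first components: same set of candidates
          apply min?_getD_congr
          intro x
          simp only [List.mem_append, List.mem_map, List.mem_filter, List.mem_singleton]
          constructor
          · rintro ((hx | hx) | ⟨v, ⟨hv1, hv2⟩, hv3⟩)
            · exact Or.inl hx
            · exact Or.inr ⟨m, ⟨hm, by simpa using hpos⟩, by rw [hx]⟩
            · exact Or.inr ⟨v, ⟨List.erase_subset hv1, hv2⟩, hv3⟩
          · rintro (hx | ⟨v, ⟨hv1, hv2⟩, hv3⟩)
            · exact Or.inl (Or.inl hx)
            · by_cases hvm : v = m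
              · subst hvm; exact Or.inl (Or.inr hv3.symm)
              · exact Or.inr ⟨v, ⟨(List.mem_erase_of_ne hvm).mpr hv1, hv2⟩, hv3⟩
        · -- second components
          have := sumPos_erase_max hm hpos
          omega

lemma loopB_some : ∀ (xs : List Int) (i s k : Int),
    solve6LoopB xs i s (some k) = (s + sumPos xs, some k) := by
  intro xs
  induction xs with
  | nil => intro i s k; simp [solve6LoopB, sumPos]
  | cons x xs ih =>
    intro i s k
    by_cases hx : 0 < x
    · rw [show solve6LoopB (x :: xs) i s (some k) = solve6LoopB xs (i + 1) (s + x) (some k) by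
        simp [solve6LoopB, hx]]
      rw [ih]
      unfold sumPos
      simp only [List.filter_cons, decide_eq_true_eq, if_pos hx, List.sum_cons, Prod.mk.injEq,
        and_true]
      ring
    · rw [show solve6LoopB (x :: xs) i s (some k) = solve6LoopB xs (i + 1) s (some k) by
        simp [solve6LoopB, hx]]
      rw [ih]
      unfold sumPos
      simp [hx]

lemma loopB_none : ∀ (xs : List Int) (i s : Int),
    solve6LoopB xs i s none = (s + sumPos xs, (List.findIdx? (fun x => decide (0 < x)) xs).map (fun j : Nat => i + (j : Int))) := by
  intro xs
  induction xs with
  | nil => intro i s; simp [solve6LoopB, sumPos]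
  | cons x xs ih =>
    intro i s
    by_cases hx : 0 < x
    · rw [show solve6LoopB (x :: xs) i s none = solve6LoopB xs (i + 1) (s + x) (some i) by
        simp [solve6LoopB, hx]]
      rw [loopB_some]
      unfold sumPos
      simp only [List.filter_cons, List.findIdx?_cons, decide_eq_true_eq, if_pos hx,
        List.sum_cons, Option.map_some, Prod.mk.injEq]
      constructor
      · ring
      · simp
    · rw [show solve6LoopB (x :: xs) i s none = solve6LoopB xs (i + 1) s none by
        simp [solve6LoopB, hx]]
      rw [ih]
      unfold sumPos
      simp only [List.filter_cons, List.findIdx?_cons, decide_eq_true_eq, if_neg hx,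
        Prod.mk.injEq]
      refine ⟨by simp, ?_⟩
      cases List.findIdx? (fun x => decide (0 < x)) xs with
      | none => simp
      | some j => simp; ring

-- index? of a positive value never points before the first positive position
lemma pvIdx_ge_first {seq : List Int} {j : Nat}
    (hfind : List.findIdx? (fun x => decide (0 < x)) seq = some j)
    {v : Int} (hv : v ∈ seq) (hvpos : 0 < v) :
    ∃ k : Nat, PySem.List.index? seq v = some k ∧ j ≤ k ∧ pvIdxA seq v = (k : Int) := by
  obtain ⟨hj, hpj, hjmin⟩ := List.findIdx?_eq_some_iff_getElem.mp hfind
  have hsome : (PySem.List.index? seq v).isSome = true := (PySem.List.index?_isSome_iff seq v).mpr hv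
  obtain ⟨k, hk⟩ := Option.isSome_iff_exists.mp hsome
  obtain ⟨hklt, hkv, _⟩ := PySem.List.getElem_of_index?_eq_some hk
  refine ⟨k, hk, ?_, by unfold pvIdxA; rw [hk]; simp⟩
  by_contra hlt
  have := hjmin k (by omega)
  rw [hkv] at this
  simp at this
  omega

-- the first positive element's value has first occurrence exactly at the first positive index
lemma pvIdx_at_first {seq : List Int} {j : Nat}
    (hfind : List.findIdx? (fun x => decide (0 < x)) seq = some j) :
    ∃ (hj : j < seq.length), 0 < seq[j] ∧ pvIdxA seq (seq[j]) = (j : Int) := by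
  obtain ⟨hj, hpj, hjmin⟩ := List.findIdx?_eq_some_iff_getElem.mp hfind
  simp only [decide_eq_true_eq] at hpj
  obtain ⟨k, hk, hjk, hval⟩ := pvIdx_ge_first hfind (seq.getElem_mem hj) hpj
  obtain ⟨hklt, hkv, hkmin⟩ := PySem.List.getElem_of_index?_eq_some hk
  have hkj : k = j := by
    rcases Nat.lt_or_ge j k with h | h
    · exact absurd rfl (hkmin j h)
    · omega
  subst hkj
  exact ⟨hj, hpj, hval⟩

-- ===== VERDICT (by name: the statement is the Claim_ definition above) =====
theorem solve_6_subseq_spec : Claim_equal_solve_6_subseq := by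
  intro seq hdom hpre
  unfold Spec_solve_6_subseq
  obtain ⟨m, hmax⟩ : ∃ m, PySem.List.max? seq (fun y => y) = some m := by
    cases h : PySem.List.max? seq (fun y => y) with
    | none => exact absurd ((PySem.List.max?_eq_none_iff seq _).mp h) hpre
    | some m => exact ⟨m, rfl⟩
  have hm : m ∈ seq := PySem.List.max?_mem hmax
  have hmaxle : ∀ y ∈ seq, y ≤ m := fun y hy => PySem.List.max?_isMax hmax y hy
  have hmlb : -2147483648 ≤ m := by
    unfold Dom_solve_6_subseq at hdom
    rw [List.all_eq_true] at hdom
    have := hdom m hm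
    unfold pvDomInt at this
    simp only [decide_eq_true_eq] at this
    omega
  -- A's first iteration always fires: MIN_INT < 0 + max
  have hAstep : solve_6_subseq seq =
      solve6LoopA seq (seq.erase m) [pvIdxA seq m] (0 + m) (0 + m) := by
    unfold solve_6_subseq
    rw [solve6LoopA.eq_def]
    split
    · rename_i heq
      rw [hmax] at heq
      cases heq
    · rename_i ss_max heq
      rw [hmax] at heq
      injection heq with heq
      subst heq
      rw [if_neg (by omega)]
      rw [PySem.List.remove?_eq_some_erase seq m hm]
      simp
  rw [hAstep,
    loopA_eq seq (seq.erase m).length (seq.erase m) [pvIdxA seq m] (0 + m) rfl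
      (fun x hx => List.erase_subset hx)]
  unfold solve_6_subseq_alt
  rw [loopB_none seq 0 0]
  cases hfind : List.findIdx? (fun x => decide (0 < x)) seq with
  | none =>
    -- no positive element: A selected just the max; B falls back to the max
    have hnopos : ∀ x ∈ seq, ¬ (0 < x) := by
      intro x hx
      have := List.findIdx?_eq_none_iff.mp hfind x hx
      simpa using this
    have hfil : (seq.erase m).filter (fun x => decide (0 < x)) = [] := by
      rw [List.filter_eq_nil_iff]
      intro x hx
      simpa using hnopos x (List.erase_subset hx)
    have hsum : sumPos (seq.erase m) = 0 := by simp [sumPos, hfil]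
    simp only [Option.map_none, hfil, hsum, List.map_nil, List.append_nil,
      PySem.List.min?_id_cons, List.foldl_nil, Option.getD_some, hmax]
    show ((pvIdxA seq m, 0 + m + 0) : Int × Int) = (pvIdxA seq m, m)
    simp
  | some j =>
    obtain ⟨hj, hpj, hidxj⟩ := pvIdx_at_first hfind
    have hmpos : 0 < m := lt_of_lt_of_le hpj (hmaxle _ (seq.getElem_mem hj))
    simp only [Option.map_some]
    show _ = ((0 + (j : Int), 0 + sumPos seq) : Int × Int)
    have hsum : sumPos seq = m + sumPos (seq.erase m) := sumPos_erase_max hm hmpos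
    simp only [Prod.mk.injEq]
    constructor
    · -- the minimum selected index is the first positive index
      have hminLB : ∀ x ∈ [pvIdxA seq m] ++ ((seq.erase m).filter (fun x => decide (0 < x))).map (pvIdxA seq),
          (j : Int) ≤ x := by
        intro x hx
        simp only [List.mem_map, List.mem_filter, List.cons_append, List.nil_append,
          List.mem_cons] at hx
        rcases hx with hx | ⟨v, ⟨hv1, hv2⟩, hv3⟩
        · obtain ⟨k, _, hjk, hval⟩ := pvIdx_ge_first hfind hm hmpos
          rw [hx, hval]; exact_mod_cast hjk
        · simp only [decide_eq_true_eq] at hv2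
          obtain ⟨k, _, hjk, hval⟩ := pvIdx_ge_first hfind (List.erase_subset hv1) hv2
          rw [← hv3, hval]; exact_mod_cast hjk
      have hminMem : (j : Int) ∈ [pvIdxA seq m] ++ ((seq.erase m).filter (fun x => decide (0 < x))).map (pvIdxA seq) := by
        by_cases hvm : seq[j] = m
        · rw [← hidxj, hvm]; simp
        · refine List.mem_append.mpr (Or.inr ?_)
          refine List.mem_map.mpr ⟨seq[j], List.mem_filter.mpr ⟨?_, by simpa using hpj⟩, hidxj⟩
          exact (List.mem_erase_of_ne hvm).mpr (seq.getElem_mem hj)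
      cases hmin : PySem.List.min? ([pvIdxA seq m] ++ ((seq.erase m).filter (fun x => decide (0 < x))).map (pvIdxA seq)) (fun y => y) with
      | none =>
        exfalso
        have := (PySem.List.min?_eq_none_iff _ _).mp hmin
        rw [this] at hminMem
        simp at hminMem
      | some v =>
        have h1 := hminLB v (PySem.List.min?_mem hmin)
        have h2 := PySem.List.min?_isMin hmin _ hminMem
        simp only [Option.getD_some]
        omega
    · omega
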